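-- pv_equiv track=rewrite | github.com/Ghoulli/monocle | monocle.py | calculateAddresses
-- ===== SOURCE A (Python) =====
-- def calculateAddresses(cidr):
--     default = 256 #default amount. corrosponding to /24 subnet.
--     diff = 24 - cidr
--     if diff == 0:
--         return default
--     elif diff <= 0:
--         positive = diff * -1 #makes the negative difference into a positive to do some maths with.
--         i = 1
--         while i <= positive:
--             default = default / 2
--             i += 1
--         return int(default)
--     else:
--         i = 1
--         while i <= diff:
--             default = default * 2
--             i += 1
--         return default
-- ===== SOURCE B (Python) =====
-- def calculateAddresses(cidr):
--     # closed form via bit shifts instead of A's three while-loops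
--     diff = 24 - cidr
--     return (256 << diff) if diff >= 0 else (256 >> -diff)
-- ===== Notes on version B (the rewrite author's own statement) =====
-- stated objective: faster
-- what changed: Replaces the three while-loops (repeated float halving / int doubling) by a single closed-form bit shift of 256 by |24 - cidr|.
import Mathlib
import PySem

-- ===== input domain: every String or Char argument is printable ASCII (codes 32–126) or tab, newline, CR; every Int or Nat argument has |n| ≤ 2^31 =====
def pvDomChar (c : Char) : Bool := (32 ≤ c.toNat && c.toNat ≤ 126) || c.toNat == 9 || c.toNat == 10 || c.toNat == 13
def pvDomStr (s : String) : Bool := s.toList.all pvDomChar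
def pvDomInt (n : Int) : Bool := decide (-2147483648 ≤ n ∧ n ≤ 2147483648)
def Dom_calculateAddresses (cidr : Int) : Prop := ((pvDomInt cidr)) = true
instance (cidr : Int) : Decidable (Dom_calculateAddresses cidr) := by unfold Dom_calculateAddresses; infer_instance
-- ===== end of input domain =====

-- B replaces A's three while-loops by one closed-form bit shift of 256 by |24 - cidr| (faster: O(1) vs O(|24-cidr|)).


-- ===== PORT A =====
-- A's shrinking while-loop: `while i <= positive: default = default / 2`.  Python's `/` is float
-- division; every value reached is ±a power of two, on which binary floats are exact until they
-- underflow to 0.0, and int() truncates — so over this loop exact rational division followed by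
-- floor (the value is nonnegative) computes the same integer.  Ported with ℚ, exact here.
def pvShrinkA : Nat → ℚ → ℚ
  | 0, d => d
  | n + 1, d => pvShrinkA n (d / 2)

-- A's growing while-loop: `while i <= diff: default = default * 2` (exact ints in Python).
def pvGrowA : Nat → Int → Int
  | 0, d => d
  | n + 1, d => pvGrowA n (d * 2)

def calculateAddresses (cidr : Int) : Int :=
  let dflt : Int := 256
  let diff : Int := 24 - cidr
  if diff = 0 then dflt
  else if diff ≤ 0 then
    let positive := diff * -1
    ⌊pvShrinkA positive.toNat ((dflt : ℚ))⌋   -- int(default): truncation = floor on this nonneg value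
  else
    pvGrowA diff.toNat dflt

-- ===== PORT B =====
def calculateAddresses_alt (cidr : Int) : Int :=
  let diff : Int := 24 - cidr
  if diff ≥ 0 then ((256 <<< diff.toNat : Nat) : Int)   -- 256 << diff (256 ≥ 0, so Python's shift = Nat shift)
  else ((256 >>> (-diff).toNat : Nat) : Int)            -- 256 >> -diff

-- ===== PRECONDITION & SPEC =====
def Spec_calculateAddresses (cidr : Int) (out : Int) : Prop := out = calculateAddresses_alt cidr
instance (cidr : Int) (out : Int) : Decidable (Spec_calculateAddresses cidr out) := by unfold Spec_calculateAddresses; infer_instance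

-- ===== CLAIM (what is proved, stated in full; the proofs are below) =====
def Claim_equal_calculateAddresses : Prop := ∀ (cidr : Int), Dom_calculateAddresses cidr → Spec_calculateAddresses cidr (calculateAddresses cidr)

-- ===== LEMMAS AND PROOFS =====

theorem pvShrinkA_eq (n : Nat) (d : ℚ) : pvShrinkA n d = d / 2 ^ n := by
  induction n generalizing d with
  | zero => simp [pvShrinkA]
  | succ k ih => simp [pvShrinkA, ih, pow_succ]; ring

theorem pvGrowA_eq (n : Nat) (d : Int) : pvGrowA n d = d * 2 ^ n := by
  induction n generalizing d with
  | zero => simp [pvGrowA]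
  | succ k ih => simp [pvGrowA, ih, pow_succ]; ring

theorem floor_256_div_pow (n : Nat) : ⌊(256 : ℚ) / 2 ^ n⌋ = ((256 >>> n : Nat) : Int) := by
  rw [Nat.shiftRight_eq_div_pow]
  rcases le_or_gt n 8 with h | h
  · have h256 : (256 : ℚ) = 2 ^ 8 := by norm_num
    have hdvd : (2 : Nat) ^ n ∣ 256 := by
      have : (256 : Nat) = 2 ^ 8 := by norm_num
      rw [this]; exact pow_dvd_pow 2 h
    have : (256 : ℚ) / 2 ^ n = ((256 / 2 ^ n : Nat) : ℚ) := by
      rw [Nat.cast_div hdvd (by positivity)]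
      norm_num
    rw [this, Int.floor_natCast]
  · have hlt : (256 : ℚ) / 2 ^ n < 1 := by
      rw [div_lt_one (by positivity)]
      have : (2 : ℚ) ^ 9 ≤ 2 ^ n := pow_le_pow_right₀ (by norm_num) h
      calc (256 : ℚ) < 2 ^ 9 := by norm_num
        _ ≤ 2 ^ n := this
    have hge : (0 : ℚ) ≤ 256 / 2 ^ n := by positivity
    have hz : ⌊(256 : ℚ) / 2 ^ n⌋ = 0 := by
      rw [Int.floor_eq_zero_iff]; exact Set.mem_Ico.mpr ⟨hge, hlt⟩
    have hnz : 256 / 2 ^ n = (0 : Nat) := by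
      apply Nat.div_eq_of_lt
      calc (256 : Nat) < 2 ^ 9 := by norm_num
        _ ≤ 2 ^ n := Nat.pow_le_pow_right (by norm_num) h
    rw [hz, hnz]; rfl

-- ===== VERDICT (by name: the statement is the Claim_ definition above) =====
theorem calculateAddresses_spec : Claim_equal_calculateAddresses := by
  intro cidr _
  unfold Spec_calculateAddresses calculateAddresses calculateAddresses_alt
  set diff := 24 - cidr with hdiff
  by_cases h0 : diff = 0
  · simp [h0]
  · simp only [h0, if_false]
    by_cases hle : diff ≤ 0
    · have hge : ¬ diff ≥ 0 := by omega
      simp only [hle, if_true, hge, if_false]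
      have : diff * -1 = -diff := by ring
      rw [this, pvShrinkA_eq]
      have hc : ((256 : Int) : ℚ) = 256 := by norm_cast
      rw [hc, floor_256_div_pow]
    · have hge : diff ≥ 0 := by omega
      simp only [hle, if_false, hge, if_true]
      rw [pvGrowA_eq, Nat.shiftLeft_eq]
      push_cast
      ring
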